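-- pv_equiv track=rewrite | github.com/Jordan231111/CodeForce-Solutions | brute_c_against_diff.py | is_neat
-- ===== SOURCE A (Python) =====
-- def is_neat(b):
--     i = 0
--     m = len(b)
--     while i < m:
--         x = b[i]
--         need = x
--         j = i
--         while j < m and b[j] == x and j - i < need:
--             j += 1
--         if j - i != need:
--             return False
--         i = j
--     return True
-- ===== SOURCE B (Python) =====
-- def is_neat(b):
--     # run-length encode b, then check each maximal run (value x, length n)
--     runs = []
--     cur = None
--     cnt = 0
--     for v in b:
--         if cnt > 0 and v == cur:
--             cnt += 1
--         else:
--             if cnt > 0: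
--                 runs.append((cur, cnt))
--             cur, cnt = v, 1
--     if cnt > 0:
--         runs.append((cur, cnt))
--     return all(x > 0 and n % x == 0 for x, n in runs)
-- ===== Notes on version B (the rewrite author's own statement) =====
-- stated objective: simpler
-- what changed: B run-length-encodes the list in one pass and checks that each maximal run's length is a multiple of its (positive) value, instead of A's nested block-by-block consumption with index arithmetic.
-- outside the precondition, e.g. on is_neat([2, 3, 0]): A returns False, B returns False; on is_neat([0]): A does not finish within the time limit, B returns False
import Mathlib
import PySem

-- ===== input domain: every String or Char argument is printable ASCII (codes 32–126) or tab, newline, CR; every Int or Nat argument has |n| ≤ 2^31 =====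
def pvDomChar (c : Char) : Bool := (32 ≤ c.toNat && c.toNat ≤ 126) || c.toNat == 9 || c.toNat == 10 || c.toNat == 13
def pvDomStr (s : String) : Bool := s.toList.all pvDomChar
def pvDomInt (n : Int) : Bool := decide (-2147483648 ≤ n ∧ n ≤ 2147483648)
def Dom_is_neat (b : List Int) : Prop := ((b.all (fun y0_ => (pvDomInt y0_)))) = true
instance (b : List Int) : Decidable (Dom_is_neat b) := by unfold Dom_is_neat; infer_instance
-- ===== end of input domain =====

-- B replaces A's nested block-by-block consumption by one run-length-encoding pass plus a
-- divisibility check per maximal run; equivalence is proved for lists not containing 0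
-- (on which A loops forever whenever the scan reaches the 0).

-- ===== PORT A =====
-- inner while: 'while j < m and b[j] == x and j - i < need: j += 1'
def isNeatInner (b : List Int) (x : Int) (i : Nat) (need : Int) (j : Nat) : Nat :=
  if h : j < b.length ∧ b[j]! = x ∧ (j : Int) - (i : Int) < need then
    isNeatInner b x i need (j + 1)
  else j
termination_by b.length - j
decreasing_by omega

-- outer while: 'while i < m: …'; fuel makes the (in Python possibly infinite) loop total;
-- under Pre_is_neat the fuel b.length + 1 is never exhausted.
def isNeatOuter (b : List Int) (fuel : Nat) (i : Nat) : Bool :=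
  match fuel with
  | 0 => false
  | fuel + 1 =>
    if i < b.length then
      let x := b[i]!
      let j := isNeatInner b x i x i
      if (j : Int) - (i : Int) ≠ x then false
      else isNeatOuter b fuel j
    else true

def is_neat (b : List Int) : Bool := isNeatOuter b (b.length + 1) 0

-- ===== PORT B =====
-- the for-loop of Source B: cur/cnt accumulate the current run, finished runs are emitted in order
def collectRuns (b : List Int) (cur : Int) (cnt : Int) : List (Int × Int) :=
  match b with
  | [] => [(cur, cnt)]
  | v :: rest => if v = cur then collectRuns rest cur (cnt + 1)
                 else (cur, cnt) :: collectRuns rest v 1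

def runsOf (b : List Int) : List (Int × Int) :=
  match b with
  | [] => []
  | v :: rest => collectRuns rest v 1

-- 'x > 0 and n % x == 0' for one run
def checkRun (p : Int × Int) : Bool := decide (0 < p.1) && decide (PySem.Int.mod p.2 p.1 = 0)

def is_neat_alt (b : List Int) : Bool := (runsOf b).all checkRun

-- ===== PRECONDITION & SPEC =====
-- Pre_ excludes lists containing 0: A's scan loops forever whenever it reaches a 0 element
-- (so A never returns on e.g. [0]); on some such lists A still returns False before reaching
-- the 0 ([2, 3, 0]), and B returns False there too.
def Pre_is_neat (b : List Int) : Prop := (0 : Int) ∉ b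
instance (b : List Int) : Decidable (Pre_is_neat b) := by unfold Pre_is_neat; infer_instance

def pvWitness_is_neat : List Int := [2, 2, 1, 3, 3, 3]

def Spec_is_neat (b : List Int) (out : Bool) : Prop := out = is_neat_alt b
instance (b : List Int) (out : Bool) : Decidable (Spec_is_neat b out) := by unfold Spec_is_neat; infer_instance

-- ===== CLAIM (what is proved, stated in full; the proofs are below) =====
def Claim_equal_is_neat : Prop := ∀ (b : List Int), Dom_is_neat b → Pre_is_neat b → Spec_is_neat b (is_neat b)

-- ===== LEMMAS AND PROOFS =====

-- run-length encoding of (replicate k x ++ rest) starts with the run of x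
lemma collectRuns_replicate (x : Int) (rest : List Int) (hx : rest.head? ≠ some x) :
    ∀ (k : Nat) (c : Int), collectRuns (List.replicate k x ++ rest) x c = (x, c + k) :: runsOf rest := by
  intro k
  induction k with
  | zero =>
    intro c
    cases rest with
    | nil => simp [collectRuns, runsOf]
    | cons v r =>
      have hv : v ≠ x := by simpa using hx
      simp [collectRuns, runsOf, hv]
  | succ k ih =>
    intro c
    rw [List.replicate_succ, List.cons_append]
    show (if x = x then collectRuns (List.replicate k x ++ rest) x (c + 1)
          else (x, c) :: collectRuns (List.replicate k x ++ rest) x 1) = _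
    rw [if_pos rfl, ih (c + 1)]
    congr 2
    push_cast
    ring

-- checking all runs of (replicate L x ++ rest) splits into the first run and the rest
lemma all_runs_replicate (x : Int) (L : Nat) (hL : 0 < L) (rest : List Int)
    (hx : rest.head? ≠ some x) :
    is_neat_alt (List.replicate L x ++ rest) =
      (checkRun (x, (L : Int)) && is_neat_alt rest) := by
  obtain ⟨L', rfl⟩ : ∃ L', L = L' + 1 := ⟨L - 1, by omega⟩
  have h1 : List.replicate (L' + 1) x ++ rest = x :: (List.replicate L' x ++ rest) := by
    simp [List.replicate_succ]
  rw [is_neat_alt, h1]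
  show (runsOf (x :: (List.replicate L' x ++ rest))).all checkRun = _
  rw [runsOf, collectRuns_replicate x rest hx L' 1]
  rw [List.all_cons]
  have hc : (1 : Int) + (L' : Int) = ((L' + 1 : Nat) : Int) := by push_cast; ring
  rw [hc, is_neat_alt]

-- if the leading value is ≤ 0, the check of the first run fails
lemma all_runs_head_nonpos (x : Int) (hx : ¬ 0 < x) :
    ∀ (rest : List Int) (c : Int), (collectRuns rest x c).all checkRun = false := by
  intro rest
  induction rest with
  | nil => intro c; simp [collectRuns, checkRun, hx]
  | cons v r ih =>
    intro c
    by_cases hv : v = x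
    · simp [collectRuns, hv, ih]
    · simp [collectRuns, hv, checkRun, hx]

-- characterization of the inner while loop: it advances past min(run length, remaining need)
lemma isNeatInner_eq (b : List Int) (x : Int) (i : Nat) (need : Int) :
    ∀ (j : Nat),
      isNeatInner b x i need j
        = j + min ((b.drop j).takeWhile (· = x)).length (need - ((j : Int) - i)).toNat := by
  intro j
  induction hfu : b.length - j using Nat.strong_induction_on generalizing j with
  | _ fu ih =>
  rw [isNeatInner]
  by_cases hcond : j < b.length ∧ b[j]! = x ∧ (j : Int) - (i : Int) < need
  · obtain ⟨hj, hbx, hneed⟩ := hcond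
    rw [dif_pos ⟨hj, hbx, hneed⟩]
    rw [ih (b.length - (j + 1)) (by omega) (j + 1) rfl]
    have hdrop : b.drop j = b[j] :: b.drop (j + 1) := List.drop_eq_getElem_cons hj
    have hbx' : b[j] = x := by rw [← hbx]; exact (getElem!_pos b j hj).symm
    rw [hdrop, hbx', List.takeWhile_cons]
    simp only [decide_true, if_true, List.length_cons]
    omega
  · rw [dif_neg hcond]
    rcases Nat.lt_or_ge j b.length with hj | hj
    · rcases Classical.em (b[j]! = x) with hbx | hbx
      · have hneed : ¬ ((j : Int) - (i : Int) < need) := by tauto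
        have h0 : (need - ((j : Int) - i)).toNat = 0 := by omega
        simp [h0]
      · have hdrop : b.drop j = b[j] :: b.drop (j + 1) := List.drop_eq_getElem_cons hj
        have hbx' : ¬ (b[j] = x) := by rw [getElem!_pos b j hj] at hbx; exact hbx
        rw [hdrop, List.takeWhile_cons]
        simp [hbx']
    · rw [List.drop_eq_nil_of_le hj]
      simp

-- the main loop invariant: the outer loop at index i agrees with B's check on the suffix
lemma outer_eq (b : List Int) (h0 : (0 : Int) ∉ b) :
    ∀ (fuel : Nat) (i : Nat), b.length - i < fuel →
      isNeatOuter b fuel i = is_neat_alt (b.drop i) := by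
  intro fuel
  induction fuel with
  | zero => intro i h; omega
  | succ fuel ih =>
    intro i hfuel
    rw [isNeatOuter]
    by_cases hi : i < b.length
    · rw [if_pos hi]
      dsimp only
      generalize hx : b[i]! = x
      have hxi : b[i] = x := by rw [← hx]; exact (getElem!_pos b i hi).symm
      have hxmem : x ∈ b := hxi ▸ List.getElem_mem hi
      have hx0 : x ≠ 0 := fun h => h0 (h ▸ hxmem)
      obtain ⟨L, hLdef⟩ : ∃ L, ((b.drop i).takeWhile (· = x)).length = L := ⟨_, rfl⟩
      obtain ⟨rest, hRdef⟩ : ∃ r, (b.drop i).dropWhile (· = x) = r := ⟨_, rfl⟩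
      have hinner : isNeatInner b x i x i = i + min L x.toNat := by
        rw [isNeatInner_eq, hLdef]
        congr 2
        omega
      have hdropi : b.drop i = b[i] :: b.drop (i + 1) := List.drop_eq_getElem_cons hi
      have hL1 : 0 < L := by
        rw [← hLdef, hdropi, hxi, List.takeWhile_cons]
        simp
      have htw : (b.drop i).takeWhile (· = x) = List.replicate L x := by
        rw [List.eq_replicate_iff]
        refine ⟨hLdef, fun c hc => ?_⟩
        simpa using List.mem_takeWhile_imp hc
      have hsplit : b.drop i = List.replicate L x ++ rest := by
        conv_lhs => rw [← List.takeWhile_append_dropWhile (p := (· = x)) (l := b.drop i)]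
        rw [htw, hRdef]
      have hrest : rest.head? ≠ some x := by
        intro hcon
        have hh := List.head?_dropWhile_not (· = x) (b.drop i)
        rw [hRdef, hcon] at hh
        simp at hh
      rcases lt_or_gt_of_ne hx0 with hxneg | hxpos
      · -- x < 0 : A returns False immediately; B fails the first-run check
        have hj : isNeatInner b x i x i = i := by rw [hinner]; omega
        rw [hj, if_pos (by omega)]
        rw [hsplit]
        obtain ⟨L', rfl⟩ : ∃ L', L = L' + 1 := ⟨L - 1, by omega⟩
        rw [List.replicate_succ, List.cons_append, is_neat_alt, runsOf]
        exact (all_runs_head_nonpos x (by omega) _ 1).symm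
      · -- x > 0
        by_cases hLx : x.toNat ≤ L
        · -- full block consumed; loop continues at i + x.toNat
          have hj : isNeatInner b x i x i = i + x.toNat := by rw [hinner]; omega
          rw [hj, if_neg (by omega), ih (i + x.toNat) (by omega)]
          have hdd : b.drop (i + x.toNat) = (b.drop i).drop x.toNat := by
            rw [List.drop_drop]
          rw [hdd]
          have hrepl_drop : (List.replicate L x ++ rest).drop x.toNat
              = List.replicate (L - x.toNat) x ++ rest := by
            rw [List.drop_append_of_le_length (by simpa using hLx), List.drop_replicate]
          conv_lhs => rw [hsplit, hrepl_drop]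
          conv_rhs => rw [hsplit]
          rw [all_runs_replicate x L hL1 _ hrest]
          by_cases hgt : x.toNat < L
          · rw [all_runs_replicate x (L - x.toNat) (by omega) _ hrest]
            congr 1
            simp only [checkRun]
            have hmodL : PySem.Int.mod (L : Int) x = (L : Int) % x :=
              PySem.Int.mod_eq_emod_of_pos hxpos
            have hmodL' : PySem.Int.mod ((L - x.toNat : Nat) : Int) x = ((L - x.toNat : Nat) : Int) % x :=
              PySem.Int.mod_eq_emod_of_pos hxpos
            rw [hmodL, hmodL']
            have hcast : ((L - x.toNat : Nat) : Int) = (L : Int) - x := by omega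
            rw [hcast, Int.sub_emod_right]
          · -- the run is exactly consumed: L = x.toNat
            have hrepl0 : List.replicate (L - x.toNat) x = ([] : List Int) := by
              have : L - x.toNat = 0 := by omega
              rw [this, List.replicate_zero]
            rw [hrepl0, List.nil_append]
            have hcheck : checkRun (x, (L : Int)) = true := by
              simp only [checkRun, Bool.and_eq_true, decide_eq_true_eq]
              refine ⟨hxpos, ?_⟩
              rw [PySem.Int.mod_eq_emod_of_pos hxpos]
              have : (L : Int) = x := by omega
              rw [this, Int.emod_self]
            rw [hcheck, Bool.true_and]
        · -- run too short: A returns False; B's first run fails L % x ≠ 0 (0 < L < x)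
          have hj : isNeatInner b x i x i = i + L := by rw [hinner]; omega
          rw [hj, if_pos (by omega)]
          conv_rhs => rw [hsplit]
          rw [all_runs_replicate x L hL1 _ hrest]
          have hcheck : checkRun (x, (L : Int)) = false := by
            simp only [checkRun, Bool.and_eq_false_iff, decide_eq_false_iff_not]
            right
            rw [PySem.Int.mod_eq_emod_of_pos hxpos]
            rw [Int.emod_eq_of_lt (by omega) (by omega)]
            omega
          rw [hcheck, Bool.false_and]
    · rw [if_neg hi, List.drop_eq_nil_of_le (by omega)]
      simp [is_neat_alt, runsOf]

-- ===== VERDICT (by name: the statement is the Claim_ definition above) =====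
theorem is_neat_spec : Claim_equal_is_neat := by
  intro b _ hpre
  unfold Spec_is_neat is_neat
  have := outer_eq b hpre (b.length + 1) 0 (by omega)
  simpa using this
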